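-- pv_equiv track=rewrite | github.com/hansung-choi/TLA-linear-ascent | utils.py | find_k_worst_class
-- ===== SOURCE A (Python) =====
-- def find_k_worst_class(acc_per_class,k):
--     # find k classes of the lowest accuracy
--     # find k classes of the highest error
--     acc_per_class = acc_per_class
--
--     if k > len(acc_per_class):
--         raise ValueError("k should be not greater than the number of classes")
--
--     max_error_class_list = [0]
--     for i in range(1,len(acc_per_class)):
--         index = 0
--         for j in range(len(max_error_class_list)):
--             if acc_per_class[max_error_class_list[j]] < acc_per_class[i]:
--                 index = j+1
--         max_error_class_list.insert(index,i)
--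
--     k_max_error_class_list = max_error_class_list[:k]
--
--     return k_max_error_class_list
-- ===== SOURCE B (Python) =====
-- def find_k_worst_class(acc_per_class, k):
--     # find k classes of the lowest accuracy, worst first
--     if k > len(acc_per_class):
--         raise ValueError("k should be not greater than the number of classes")
--     # iterate indices in reverse so the stable sort breaks accuracy ties
--     # toward the higher index, matching the original's ordering
--     order = sorted(range(len(acc_per_class) - 1, -1, -1),
--                    key=lambda i: acc_per_class[i])
--     return order[:k]
-- ===== Notes on version B (the rewrite author's own statement) =====
-- stated objective: faster
-- what changed: Replaces the hand-written quadratic insertion sort with its inner position-scan by a single stable key-sort of the index range iterated in reverse (so ties resolve to the higher index, as in A), then slices the first k.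
import Mathlib
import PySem

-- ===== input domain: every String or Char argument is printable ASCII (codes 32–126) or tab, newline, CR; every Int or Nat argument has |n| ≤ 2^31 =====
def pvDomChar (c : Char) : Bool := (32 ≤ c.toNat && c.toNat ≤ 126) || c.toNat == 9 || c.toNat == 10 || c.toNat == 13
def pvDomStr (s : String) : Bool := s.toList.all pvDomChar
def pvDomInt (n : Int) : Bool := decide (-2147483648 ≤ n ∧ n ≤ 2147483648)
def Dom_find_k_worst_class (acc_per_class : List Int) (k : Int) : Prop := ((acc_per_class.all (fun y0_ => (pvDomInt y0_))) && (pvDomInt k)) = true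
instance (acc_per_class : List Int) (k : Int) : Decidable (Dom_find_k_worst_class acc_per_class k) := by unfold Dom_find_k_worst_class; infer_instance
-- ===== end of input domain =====

-- B replaces A's hand-written insertion sort by a stable key-sort of the reversed index range, then slices; objective: faster (O(n log n) vs O(n^2)).

-- ===== PORT A =====
def find_k_worst_class (acc_per_class : List Int) (k : Int) : List Int :=
  -- 'if k > len(acc_per_class): raise ValueError(...)' is excluded by Pre_ below
  let lst := (PySem.List.pyRange 1 (acc_per_class.length : Int) 1).foldl
    (fun lst i =>
      let index := (PySem.List.pyRange 0 (lst.length : Int) 1).foldl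
        (fun index j =>
          if PySem.List.pyGetD acc_per_class (PySem.List.pyGetD lst j 0) 0
               < PySem.List.pyGetD acc_per_class i 0
          then j + 1 else index) 0
      PySem.List.insert lst index i) [0]
  PySem.List.slice lst none (some k)

-- ===== PORT B =====
def find_k_worst_class_alt (acc_per_class : List Int) (k : Int) : List Int :=
  -- same guard 'if k > len(...): raise ValueError(...)' excluded by Pre_
  let order := PySem.List.sorted
    (PySem.List.pyRange ((acc_per_class.length : Int) - 1) (-1) (-1))
    (fun i => PySem.List.pyGetD acc_per_class i 0) false
  PySem.List.slice order none (some k)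

-- ===== PRECONDITION & SPEC =====
-- A raises ValueError exactly when k > len(acc_per_class); B keeps the same guard.
def Pre_find_k_worst_class (acc_per_class : List Int) (k : Int) : Prop :=
  k ≤ (acc_per_class.length : Int)
instance (acc_per_class : List Int) (k : Int) : Decidable (Pre_find_k_worst_class acc_per_class k) := by unfold Pre_find_k_worst_class; infer_instance

def pvWitness_find_k_worst_class : List Int × Int := ([3, 1, 2, 1], 2)

def Spec_find_k_worst_class (acc_per_class : List Int) (k : Int) (out : List Int) : Prop := out = find_k_worst_class_alt acc_per_class k
instance (acc_per_class : List Int) (k : Int) (out : List Int) : Decidable (Spec_find_k_worst_class acc_per_class k out) := by unfold Spec_find_k_worst_class; infer_instance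

-- ===== CLAIM (what is proved, stated in full; the proofs are below) =====
def Claim_equal_find_k_worst_class : Prop := ∀ (acc_per_class : List Int) (k : Int), Dom_find_k_worst_class acc_per_class k → Pre_find_k_worst_class acc_per_class k → Spec_find_k_worst_class acc_per_class k (find_k_worst_class acc_per_class k)

-- ===== LEMMAS AND PROOFS =====

-- the key both programs order indices by
def pvKey (acc : List Int) (i : Int) : Int := PySem.List.pyGetD acc i 0

-- the strict order actually produced: accuracy ascending, ties by index descending
def pvR (acc : List Int) (x y : Int) : Prop :=
  pvKey acc x < pvKey acc y ∨ (pvKey acc x = pvKey acc y ∧ y < x)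

theorem pvR_asymm (acc : List Int) (x y : Int) (h1 : pvR acc x y) (h2 : pvR acc y x) : False := by
  rcases h1 with h | ⟨h, h'⟩ <;> rcases h2 with g | ⟨g, g'⟩ <;> omega

theorem pvR_key_le (acc : List Int) {x y : Int} (h : pvR acc x y) : pvKey acc x ≤ pvKey acc y := by
  rcases h with h | ⟨h, _⟩ <;> omega

-- two pvR-sorted permutations coincide
theorem pv_sorted_unique (acc : List Int) (l1 l2 : List Int)
    (h1 : l1.Pairwise (pvR acc)) (h2 : l2.Pairwise (pvR acc)) (hp : l1.Perm l2) : l1 = l2 := by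
  exact List.Perm.eq_of_pairwise (fun a b _ _ ha hb => absurd hb (fun hb => pvR_asymm acc a b ha hb)) h1 h2 hp

-- insertBy returns a permutation of x :: s
theorem pv_insertBy_perm {α : Type} (before : α → α → Bool) (x : α) (s : List α) :
    (PySem.List.insertBy before x s).Perm (x :: s) := by
  induction s with
  | nil => simp [PySem.List.insertBy]
  | cons y ys ih =>
      by_cases h : before x y
      · simp [PySem.List.insertBy, h]
      · simp only [PySem.List.insertBy, h, if_neg]
        exact (ih.cons y).trans (List.Perm.swap x y ys)

-- B's insertion step keeps the list pvR-sorted when x is below everything present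
theorem pv_insertBy_pairwise (acc : List Int) (x : Int) (s : List Int)
    (hs : s.Pairwise (pvR acc)) (hlt : ∀ y ∈ s, x < y) :
    (PySem.List.insertBy (fun u v => decide (pvKey acc u < pvKey acc v)) x s).Pairwise (pvR acc) := by
  induction s with
  | nil => simp [PySem.List.insertBy]
  | cons y ys ih =>
      rcases List.pairwise_cons.mp hs with ⟨hy, hys⟩
      by_cases h : pvKey acc x < pvKey acc y
      · simp only [PySem.List.insertBy, h, decide_true, if_pos]
        refine List.pairwise_cons.mpr ⟨?_, hs⟩
        intro w hw
        rcases List.mem_cons.mp hw with rfl | hw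
        · exact Or.inl h
        · exact Or.inl (lt_of_lt_of_le h (pvR_key_le acc (hy w hw)))
      · simp only [PySem.List.insertBy, h, decide_false, if_neg, Bool.false_eq_true,
          not_false_iff]
        refine List.pairwise_cons.mpr ⟨?_, ih hys (fun z hz => hlt z (List.mem_cons_of_mem y hz))⟩
        intro w hw
        rcases (PySem.List.mem_insertBy _ x w ys).mp hw with rfl | hw
        · rcases lt_or_eq_of_le (not_lt.mp h) with hlt' | heq
          · exact Or.inl hlt'
          · exact Or.inr ⟨heq, hlt y List.mem_cons_self⟩
        · exact hy w hw

-- B's whole fold: permutation of the index range, pvR-sorted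
theorem pv_Bfold (acc : List Int) :
    ∀ (kf : Nat) (j : Int) (s : List Int), j < (kf : Int) →
      s.Pairwise (pvR acc) → (∀ y ∈ s, j < y) →
      ((PySem.List.pyRange j (-1) (-1)).foldl
        (fun accu x => PySem.List.insertBy (fun u v => decide (pvKey acc u < pvKey acc v)) x accu) s).Perm
        (PySem.List.pyRange 0 (j+1) 1 ++ s) ∧
      ((PySem.List.pyRange j (-1) (-1)).foldl
        (fun accu x => PySem.List.insertBy (fun u v => decide (pvKey acc u < pvKey acc v)) x accu) s).Pairwise (pvR acc) := by
  intro kf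
  induction kf with
  | zero =>
      intro j s hj hs _
      rw [PySem.List.pyRange_neg_one_eq_nil (by omega), PySem.List.pyRange_one_eq_nil (by omega)]
      exact ⟨by simpa using List.Perm.refl s, hs⟩
  | succ kf ih =>
      intro j s hj hs hgt
      by_cases hneg : j < 0
      · rw [PySem.List.pyRange_neg_one_eq_nil (by omega), PySem.List.pyRange_one_eq_nil (by omega)]
        exact ⟨by simpa using List.Perm.refl s, hs⟩
      · rw [PySem.List.pyRange_neg_one_cons (by omega : (-1:Int) < j)]
        simp only [List.foldl_cons]
        have hperm' := pv_insertBy_perm (fun u v => decide (pvKey acc u < pvKey acc v)) j s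
        have hpair' := pv_insertBy_pairwise acc j s hs hgt
        have hgt' : ∀ y ∈ PySem.List.insertBy (fun u v => decide (pvKey acc u < pvKey acc v)) j s,
            j - 1 < y := by
          intro y hy
          rcases (PySem.List.mem_insertBy _ j y s).mp hy with rfl | hy
          · omega
          · have := hgt y hy; omega
        obtain ⟨hp, hw⟩ := ih (j - 1) _ (by omega) hpair' hgt'
        refine ⟨hp.trans ?_, hw⟩
        have hsplit : PySem.List.pyRange 0 (j + 1) 1 = PySem.List.pyRange 0 j 1 ++ [j] :=
          PySem.List.pyRange_one_succ_right (by omega)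
        have : (j - 1) + 1 = j := by ring
        rw [this, hsplit, List.append_assoc, List.singleton_append]
        exact List.Perm.append_left _ hperm'

-- A's inner fold computes the length of the pvKey-<c prefix of a pvR-sorted list
theorem pv_enumFold (P : Int → Bool) :
    ∀ (lst : List Int) (s idx0 : Int), lst.Pairwise (fun y z => P z = true → P y = true) →
      (PySem.List.enumerate lst s).foldl (fun idx p => if P p.2 then p.1 + 1 else idx) idx0
        = if 0 < (lst.takeWhile P).length then s + ((lst.takeWhile P).length : Int) else idx0 := by
  intro lst
  induction lst with
  | nil => intro s idx0 _; simp [PySem.List.enumerate_nil]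
  | cons y t ih =>
      intro s idx0 hpc
      rcases List.pairwise_cons.mp hpc with ⟨hy, ht⟩
      rw [PySem.List.enumerate_cons]
      simp only [List.foldl_cons]
      by_cases hP : P y = true
      · rw [if_pos hP, ih (s + 1) (s + 1) ht]
        rw [List.takeWhile_cons, if_pos hP]
        by_cases h0 : 0 < (t.takeWhile P).length
        · rw [if_pos h0, if_pos (by simp)]
          simp only [List.length_cons]; push_cast; ring
        · rw [if_neg h0, if_pos (by simp)]
          simp only [List.length_cons]
          have : (t.takeWhile P).length = 0 := by omega
          rw [this]; push_cast; ring
      · rw [if_neg hP]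
        have hall : ∀ (a : Int), ∀ p ∈ PySem.List.enumerate t (s + 1),
            (if P p.2 = true then p.1 + 1 else a) = a := by
          intro a p hp
          obtain ⟨k, hk, rfl⟩ := (PySem.List.mem_enumerate_iff t (s + 1) p).mp hp
          have : P t[k] = true → P y = true := hy t[k] (List.getElem_mem hk)
          have hfalse : ¬ P t[k] = true := fun hc => hP (this hc)
          simp [hfalse]
        rw [PySem.List.foldl_congr_mem _ _ (fun a _ => a) idx0 hall, PySem.List.foldl_ignore]
        rw [List.takeWhile_cons, if_neg hP]
        simp

theorem pv_innerIdx (acc : List Int) (lst : List Int) (c : Int) (hp : lst.Pairwise (pvR acc)) :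
    (PySem.List.pyRange 0 (lst.length : Int) 1).foldl
      (fun index j => if PySem.List.pyGetD acc (PySem.List.pyGetD lst j 0) 0 < c then j + 1 else index) 0
    = ((lst.takeWhile (fun y => decide (pvKey acc y < c))).length : Int) := by
  have hpc : lst.Pairwise (fun y z => (fun w => decide (pvKey acc w < c)) z = true →
      (fun w => decide (pvKey acc w < c)) y = true) := by
    refine hp.imp ?_
    intro a b hR
    simp only [decide_eq_true_eq]
    intro h
    exact lt_of_le_of_lt (pvR_key_le acc hR) h
  have key : (PySem.List.pyRange 0 (lst.length : Int) 1).foldl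
      (fun index j => if PySem.List.pyGetD acc (PySem.List.pyGetD lst j 0) 0 < c then j + 1 else index) 0
      = (PySem.List.enumerate lst 0).foldl
        (fun idx p => if (fun w => decide (pvKey acc w < c)) p.2 = true then p.1 + 1 else idx) 0 := by
    rw [PySem.List.enumerate_eq_map_pyRange lst (0 : Int), List.foldl_map]
    simp [pvKey, PySem.List.len]
  rw [key, pv_enumFold (fun w => decide (pvKey acc w < c)) lst 0 0 hpc]
  split_ifs with h
  · omega
  · omega

-- in a prefix-closed list, everything after the dropped prefix fails the test
theorem pv_dropWhile_false (P : Int → Bool) :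
    ∀ (lst : List Int), lst.Pairwise (fun y z => P z = true → P y = true) →
      ∀ z ∈ lst.dropWhile P, P z = false := by
  intro lst
  induction lst with
  | nil => intro _ z hz; simp at hz
  | cons y t ih =>
      intro hpc z hz
      rcases List.pairwise_cons.mp hpc with ⟨hy, ht⟩
      by_cases hP : P y = true
      · rw [List.dropWhile_cons, if_pos hP] at hz
        exact ih ht z hz
      · rw [List.dropWhile_cons, if_neg hP] at hz
        rcases List.mem_cons.mp hz with rfl | hz
        · exact Bool.eq_false_iff.mpr hP
        · exact Bool.eq_false_iff.mpr (fun hc => hP (hy z hz hc))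

-- A's insertion step
theorem pv_Astep (acc : List Int) (lst : List Int) (x : Int)
    (hp : lst.Pairwise (pvR acc)) (hlt : ∀ y ∈ lst, y < x) :
    (PySem.List.insert lst ((lst.takeWhile (fun y => decide (pvKey acc y < pvKey acc x))).length : Int) x).Perm (x :: lst) ∧
    (PySem.List.insert lst ((lst.takeWhile (fun y => decide (pvKey acc y < pvKey acc x))).length : Int) x).Pairwise (pvR acc) := by
  have hpc : lst.Pairwise (fun y z => (fun w => decide (pvKey acc w < pvKey acc x)) z = true →
      (fun w => decide (pvKey acc w < pvKey acc x)) y = true) := by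
    refine hp.imp ?_
    intro a b hR
    simp only [decide_eq_true_eq]
    intro h
    exact lt_of_le_of_lt (pvR_key_le acc hR) h
  have hdrop := pv_dropWhile_false _ lst hpc
  set t := lst.takeWhile (fun y => decide (pvKey acc y < pvKey acc x)) with ht
  set d := lst.dropWhile (fun y => decide (pvKey acc y < pvKey acc x)) with hd
  have hsplit : t ++ d = lst := List.takeWhile_append_dropWhile
  have hlen : t.length ≤ lst.length := by
    have := congrArg List.length hsplit
    simp only [List.length_append] at this
    omega
  have hins : PySem.List.insert lst (t.length : Int) x = t ++ x :: d := by
    rw [PySem.List.insert_natCast lst _ x hlen, ← hsplit, List.take_left, List.drop_left]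
  rw [hins]
  constructor
  · have hmid := List.perm_middle (a := x) (l₁ := t) (l₂ := d)
    rw [hsplit] at hmid
    exact hmid
  · have hporig : (t ++ d).Pairwise (pvR acc) := by rw [hsplit]; exact hp
    rcases List.pairwise_append.mp hporig with ⟨hpt, hpd, hcross⟩
    refine List.pairwise_append.mpr ⟨hpt, ?_, ?_⟩
    · refine List.pairwise_cons.mpr ⟨?_, hpd⟩
      intro z hz
      have hzf := hdrop z hz
      have hzk : pvKey acc x ≤ pvKey acc z := by
        rcases Bool.eq_false_iff.mp hzf with h'
        have : ¬ (pvKey acc z < pvKey acc x) := fun hc => h' (decide_eq_true hc)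
        omega
      have hzlt : z < x := hlt z (by rw [← hsplit]; exact List.mem_append_right _ hz)
      rcases lt_or_eq_of_le hzk with h' | h'
      · exact Or.inl h'
      · exact Or.inr ⟨h', hzlt⟩
    · intro u hu w hw
      rcases List.mem_cons.mp hw with rfl | hw
      · have := List.mem_takeWhile_imp hu
        simp only [decide_eq_true_eq] at this
        exact Or.inl this
      · exact hcross u hu w hw

-- A's whole fold
theorem pv_Afold (acc : List Int) :
    ∀ (i : Int), 1 ≤ i → i ≤ (acc.length : Int) →
      ((PySem.List.pyRange 1 i 1).foldl
        (fun lst i =>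
          let index := (PySem.List.pyRange 0 (lst.length : Int) 1).foldl
            (fun index j =>
              if PySem.List.pyGetD acc (PySem.List.pyGetD lst j 0) 0 < PySem.List.pyGetD acc i 0
              then j + 1 else index) 0
          PySem.List.insert lst index i) [0]).Perm (PySem.List.pyRange 0 i 1) ∧
      ((PySem.List.pyRange 1 i 1).foldl
        (fun lst i =>
          let index := (PySem.List.pyRange 0 (lst.length : Int) 1).foldl
            (fun index j =>
              if PySem.List.pyGetD acc (PySem.List.pyGetD lst j 0) 0 < PySem.List.pyGetD acc i 0
              then j + 1 else index) 0
          PySem.List.insert lst index i) [0]).Pairwise (pvR acc) := by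
  intro i h1
  induction i, h1 using Int.le_induction with
  | base =>
      intro _
      rw [PySem.List.pyRange_one_eq_nil le_rfl]
      simp only [List.foldl_nil]
      constructor
      · rw [show PySem.List.pyRange 0 1 1 = [0] from rfl]
      · simp
  | succ i hi ih =>
      intro hle
      obtain ⟨hpm, hpw⟩ := ih (by omega)
      rw [PySem.List.pyRange_one_succ_right (by omega : (1:Int) ≤ i), List.foldl_append]
      simp only [List.foldl_cons, List.foldl_nil]
      have hlt : ∀ y ∈ ((PySem.List.pyRange 1 i 1).foldl
          (fun lst i =>
            let index := (PySem.List.pyRange 0 (lst.length : Int) 1).foldl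
              (fun index j =>
                if PySem.List.pyGetD acc (PySem.List.pyGetD lst j 0) 0 < PySem.List.pyGetD acc i 0
                then j + 1 else index) 0
            PySem.List.insert lst index i) [0]), y < i := by
        intro y hy
        have := (hpm.mem_iff).mp hy
        have := (PySem.List.mem_pyRange_one).mp this
        omega
      have hc : PySem.List.pyGetD acc i 0 = pvKey acc i := rfl
      rw [hc, pv_innerIdx acc _ (pvKey acc i) hpw]
      obtain ⟨hpm2, hpw2⟩ := pv_Astep acc _ i hpw hlt
      refine ⟨hpm2.trans ?_, hpw2⟩
      have h3 := (List.perm_append_singleton i (PySem.List.pyRange 0 i 1)).symm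
      rw [← PySem.List.pyRange_one_succ_right (by omega : (0:Int) ≤ i)] at h3
      exact (hpm.cons i).trans h3

-- ===== VERDICT (by name: the statement is the Claim_ definition above) =====
theorem find_k_worst_class_spec : Claim_equal_find_k_worst_class := by
  intro acc k _ hpre
  unfold Pre_find_k_worst_class at hpre
  unfold Spec_find_k_worst_class find_k_worst_class find_k_worst_class_alt
  by_cases hn : acc.length = 0
  · -- empty list: A's seed [0] is sliced away since k ≤ 0
    rw [List.length_eq_zero_iff.mp hn]
    simp only [List.length_nil, Nat.cast_zero]
    rw [PySem.List.pyRange_one_eq_nil (by omega), List.foldl_nil]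
    rw [show (0:Int) - 1 = -1 from rfl, PySem.List.pyRange_neg_one_eq_nil le_rfl]
    rw [show PySem.List.sorted ([] : List Int) (fun i => PySem.List.pyGetD ([] : List Int) i 0) false = [] from rfl]
    have hk0 : k ≤ 0 := by rw [hn] at hpre; exact_mod_cast hpre
    rcases eq_or_lt_of_le hk0 with rfl | hneg
    · rfl
    · obtain ⟨m, hm, rfl⟩ : ∃ m : Nat, 0 < m ∧ k = -(m : Int) :=
        ⟨(-k).toNat, by omega, by omega⟩
      rw [PySem.List.slice_to_neg_natCast _ _ hm, PySem.List.slice_to_neg_natCast _ _ hm]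
      rcases m with _ | m
      · omega
      · simp
  · -- nonempty list: both sides build the same pvR-sorted permutation of range(n)
    have h1 : (1 : Int) ≤ (acc.length : Int) := by omega
    obtain ⟨hA1, hA2⟩ := pv_Afold acc (acc.length : Int) h1 le_rfl
    have hfun : (fun a b => decide ((fun i => PySem.List.pyGetD acc i 0) a
        < (fun i => PySem.List.pyGetD acc i 0) b))
        = (fun u v => decide (pvKey acc u < pvKey acc v)) := rfl
    rw [PySem.List.sorted_eq_foldl_insertBy, hfun]
    obtain ⟨hB1, hB2⟩ := pv_Bfold acc acc.length ((acc.length : Int) - 1) []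
      (by omega) List.Pairwise.nil (by intro y hy; simp at hy)
    rw [show (acc.length : Int) - 1 + 1 = (acc.length : Int) by ring, List.append_nil] at hB1
    rw [pv_sorted_unique acc _ _ hA2 hB2 (hA1.trans hB1.symm)]
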